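-- pv_equiv track=rewrite | github.com/shawinsoranakom/CodeSnippets | CollectedSnippets/ComplexMethod/cm045010.py | inject_argument_hint
-- ===== SOURCE A (Python) =====
-- def inject_argument_hint(content: str, hint: str) -> str:
--         """Insert ``argument-hint`` after the first ``description:`` in YAML frontmatter.
--
--         Skips injection if ``argument-hint:`` already exists in the
--         frontmatter to avoid duplicate keys.
--         """
--         lines = content.splitlines(keepends=True)
--
--         # Pre-scan: bail out if argument-hint already present in frontmatter
--         dash_count = 0
--         for line in lines:
--             stripped = line.rstrip("\n\r")
--             if stripped == "---":
--                 dash_count += 1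
--                 if dash_count == 2:
--                     break
--                 continue
--             if dash_count == 1 and stripped.startswith("argument-hint:"):
--                 return content  # already present
--
--         out: list[str] = []
--         in_fm = False
--         dash_count = 0
--         injected = False
--         for line in lines:
--             stripped = line.rstrip("\n\r")
--             if stripped == "---":
--                 dash_count += 1
--                 in_fm = dash_count == 1
--                 out.append(line)
--                 continue
--             if in_fm and not injected and stripped.startswith("description:"):
--                 out.append(line)
--                 # Preserve the exact line-ending style (\r\n vs \n)
--                 if line.endswith("\r\n"):
--                     eol = "\r\n"
--                 elif line.endswith("\n"):
--                     eol = "\n"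
--                 else:
--                     eol = ""
--                 escaped = hint.replace("\\", "\\\\").replace('"', '\\"')
--                 out.append(f'argument-hint: "{escaped}"{eol}')
--                 injected = True
--                 continue
--             out.append(line)
--         return "".join(out)
-- ===== SOURCE B (Python) =====
-- def inject_argument_hint(content: str, hint: str) -> str:
--     """Splice-based rewrite: locate frontmatter bounds by index, then slice-and-splice."""
--     lines = content.splitlines(keepends=True)
--     strip = lambda l: l.rstrip("\n\r")
--     first = next((i for i, l in enumerate(lines) if strip(l) == "---"), None)
--     if first is None:
--         return "".join(lines)
--     rest = lines[first + 1:]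
--     fm_len = next((k for k, l in enumerate(rest) if strip(l) == "---"), len(rest))
--     fm = rest[:fm_len]
--     if any(strip(l).startswith("argument-hint:") for l in fm):
--         return content
--     j = next((k for k, l in enumerate(fm) if strip(l).startswith("description:")), None)
--     if j is None:
--         return "".join(lines)
--     eol = "\r\n" if fm[j].endswith("\r\n") else "\n" if fm[j].endswith("\n") else ""
--     escaped = hint.replace("\\", "\\\\").replace('"', '\\"')
--     pos = first + 1 + j + 1
--     return "".join(lines[:pos] + [f'argument-hint: "{escaped}"{eol}'] + lines[pos:])
-- ===== Notes on version B (the rewrite author's own statement) =====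
-- stated objective: simpler
-- what changed: Replaced A's two stateful line-by-line passes (dash_count/in_fm/injected state machine) with an index computation: find the two '---' boundary indices, check/search the sliced frontmatter segment, and splice the new line in by list slicing.
import Mathlib
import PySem

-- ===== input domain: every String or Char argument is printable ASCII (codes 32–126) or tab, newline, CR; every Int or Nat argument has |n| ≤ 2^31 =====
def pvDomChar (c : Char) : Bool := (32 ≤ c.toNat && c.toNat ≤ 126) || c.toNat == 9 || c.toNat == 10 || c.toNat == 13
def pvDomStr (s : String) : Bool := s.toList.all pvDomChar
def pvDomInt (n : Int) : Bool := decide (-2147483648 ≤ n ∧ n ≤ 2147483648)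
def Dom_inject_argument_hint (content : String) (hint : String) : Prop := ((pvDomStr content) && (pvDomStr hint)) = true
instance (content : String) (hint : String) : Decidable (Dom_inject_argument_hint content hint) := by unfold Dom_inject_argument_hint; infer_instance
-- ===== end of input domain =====

-- B replaces A's two stateful line-by-line passes by computing the frontmatter boundary
-- indices once and splicing the new line in by list slicing (objective: simpler).

-- shared helpers (both Pythons perform these identical sub-computations)
-- content.splitlines(keepends=True), hand-ported: exact on the stated domain, whose only
-- line-break characters are '\n', '\r' and "\r\n" (Python's extra breaks \v, \f, … are outside Dom)
def pvSplitKEAux : List Char → List Char → List String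
  | acc, [] => if acc.isEmpty then [] else [String.ofList acc.reverse]
  | acc, '\r' :: '\n' :: rest => String.ofList (acc.reverse ++ ['\r', '\n']) :: pvSplitKEAux [] rest
  | acc, '\n' :: rest => String.ofList (acc.reverse ++ ['\n']) :: pvSplitKEAux [] rest
  | acc, '\r' :: rest => String.ofList (acc.reverse ++ ['\r']) :: pvSplitKEAux [] rest
  | acc, c :: rest => pvSplitKEAux (c :: acc) rest

def pvSplitKeepends (content : String) : List String := pvSplitKEAux [] content.toList

-- line.rstrip("\n\r"), hand-ported: drop trailing '\n'/'\r' characters (exact for this char set)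
def pvStripNl (l : String) : String :=
  String.ofList ((l.toList.reverse.dropWhile (fun c => c == '\n' || c == '\r')).reverse)

def pvIsDash (l : String) : Bool := pvStripNl l == "---"
def pvArgP (l : String) : Bool := PySem.Str.startswith (pvStripNl l) "argument-hint:"
def pvDescP (l : String) : Bool := PySem.Str.startswith (pvStripNl l) "description:"

-- the injected line: f'argument-hint: "{escaped}"{eol}' with eol copied from line l
def pvInjLine (hint l : String) : String :=
  let eol := if PySem.Str.endswith l "\r\n" then "\r\n"
             else if PySem.Str.endswith l "\n" then "\n" else ""
  let escaped := PySem.Str.replace (PySem.Str.replace hint "\\" "\\\\") "\"" "\\\""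
  "argument-hint: \"" ++ escaped ++ "\"" ++ eol

-- ===== PORT A =====
-- A's pre-scan loop (dash_count state; returns true iff 'argument-hint:' found in frontmatter)
def pvPreScan (dash : Nat) : List String → Bool
  | [] => false
  | l :: rest =>
    if pvIsDash l then
      if dash + 1 == 2 then false else pvPreScan (dash + 1) rest
    else if dash == 1 && pvArgP l then true
    else pvPreScan dash rest

-- A's main loop (in_fm / dash_count / injected state machine building `out`)
def pvLoop (hint : String) (inFm : Bool) (dash : Nat) (injected : Bool) : List String → List String
  | [] => []
  | l :: rest =>
    if pvIsDash l then l :: pvLoop hint (dash + 1 == 1) (dash + 1) injected rest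
    else if inFm && !injected && pvDescP l then
      l :: pvInjLine hint l :: pvLoop hint inFm dash true rest
    else l :: pvLoop hint inFm dash injected rest

def inject_argument_hint (content : String) (hint : String) : String :=
  let lines := pvSplitKeepends content
  if pvPreScan 0 lines then content
  else PySem.Str.join "" (pvLoop hint false 0 false lines)

-- ===== PORT B =====
def inject_argument_hint_alt (content : String) (hint : String) : String :=
  let lines := pvSplitKeepends content
  match List.findIdx? pvIsDash lines with
  | none => PySem.Str.join "" lines
  | some first =>
    let rest := lines.drop (first + 1)
    let fmLen := match List.findIdx? pvIsDash rest with
      | some k => k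
      | none => rest.length
    let fm := rest.take fmLen
    if fm.any pvArgP then content
    else
      match List.findIdx? pvDescP fm with
      | none => PySem.Str.join "" lines
      | some j =>
        let pos := first + 1 + j + 1
        PySem.Str.join ""
          (lines.take pos ++ pvInjLine hint (PySem.List.pyGetD fm (j : Int) "") :: lines.drop pos)

-- ===== PRECONDITION & SPEC =====
def Spec_inject_argument_hint (content : String) (hint : String) (out : String) : Prop := out = inject_argument_hint_alt content hint
instance (content : String) (hint : String) (out : String) : Decidable (Spec_inject_argument_hint content hint out) := by unfold Spec_inject_argument_hint; infer_instance

-- ===== CLAIM (what is proved, stated in full; the proofs are below) =====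
def Claim_equal_inject_argument_hint : Prop := ∀ (content : String) (hint : String), Dom_inject_argument_hint content hint → Spec_inject_argument_hint content hint (inject_argument_hint content hint)

-- ===== LEMMAS AND PROOFS =====

-- the loop with injected = true copies the list unchanged
theorem pvLoop_injected (hint : String) (f : Bool) (d : Nat) (ls : List String) :
    pvLoop hint f d true ls = ls := by
  induction ls generalizing f d with
  | nil => rfl
  | cons l rest ih => simp [pvLoop, ih]

-- after the second '---' (dash ≥ 2, in_fm = false) the loop copies the list unchanged
theorem pvLoop_post (hint : String) (d : Nat) (hd : 2 ≤ d) (ls : List String) :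
    pvLoop hint false d false ls = ls := by
  induction ls generalizing d with
  | nil => rfl
  | cons l rest ih =>
    by_cases h : pvIsDash l = true
    · have h1 : (d + 1 == 1) = false := by simp; omega
      simp [pvLoop, h, h1, ih (d + 1) (by omega)]
    · simp at h; simp [pvLoop, h, ih d hd]

-- before the first '---' every line is copied unchanged
theorem pvLoop_pre (hint : String) (pre ls' : List String)
    (hpre : ∀ l ∈ pre, pvIsDash l = false) :
    pvLoop hint false 0 false (pre ++ ls') = pre ++ pvLoop hint false 0 false ls' := by
  induction pre with
  | nil => rfl
  | cons l t ih =>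
    simp [pvLoop, hpre l (by simp)]
    exact ih (fun x hx => hpre x (by simp [hx]))

-- entering the frontmatter at the first '---'
theorem pvLoop_enter (hint : String) (pre rest : List String) (d1 : String)
    (hpre : ∀ l ∈ pre, pvIsDash l = false) (hd1 : pvIsDash d1 = true) :
    pvLoop hint false 0 false (pre ++ d1 :: rest) = pre ++ d1 :: pvLoop hint true 1 false rest := by
  rw [pvLoop_pre hint pre _ hpre]; simp [pvLoop, hd1]

-- frontmatter without any 'description:' line is copied unchanged
theorem pvLoop_fm_nodesc (hint : String) (fm ls' : List String)
    (hfm : ∀ l ∈ fm, pvIsDash l = false ∧ pvDescP l = false) :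
    pvLoop hint true 1 false (fm ++ ls') = fm ++ pvLoop hint true 1 false ls' := by
  induction fm with
  | nil => rfl
  | cons l t ih =>
    obtain ⟨h1, h2⟩ := hfm l (by simp)
    simp [pvLoop, h1, h2]
    exact ih (fun x hx => hfm x (by simp [hx]))

-- the first 'description:' line triggers the injection; everything after is copied
theorem pvLoop_fm_desc (hint : String) (t u : List String) (dl : String)
    (ht : ∀ l ∈ t, pvIsDash l = false ∧ pvDescP l = false)
    (hdl : pvIsDash dl = false) (hdesc : pvDescP dl = true) :
    pvLoop hint true 1 false (t ++ dl :: u) = t ++ dl :: pvInjLine hint dl :: u := by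
  rw [pvLoop_fm_nodesc hint t _ ht]
  simp [pvLoop, hdl, hdesc, pvLoop_injected]

-- the tail after the frontmatter (empty, or starting with the second '---') is copied unchanged
theorem pvLoop_tail (hint : String) (rest2 : List String)
    (htail : rest2 = [] ∨ ∃ d2 tail, rest2 = d2 :: tail ∧ pvIsDash d2 = true) :
    pvLoop hint true 1 false rest2 = rest2 := by
  rcases htail with h | ⟨d2, tail, rfl, hd2⟩
  · simp [h, pvLoop]
  · simp [pvLoop, hd2, pvLoop_post hint 2 (by omega)]

-- pre-scan: lines before the first '---' are skipped (dash_count = 0)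
theorem pvPreScan_pre (pre ls' : List String) (hpre : ∀ l ∈ pre, pvIsDash l = false) :
    pvPreScan 0 (pre ++ ls') = pvPreScan 0 ls' := by
  induction pre with
  | nil => rfl
  | cons l t ih =>
    simp [pvPreScan, hpre l (by simp)]
    exact ih (fun x hx => hpre x (by simp [hx]))

theorem pvPreScan_enter (pre rest : List String) (d1 : String)
    (hpre : ∀ l ∈ pre, pvIsDash l = false) (hd1 : pvIsDash d1 = true) :
    pvPreScan 0 (pre ++ d1 :: rest) = pvPreScan 1 rest := by
  rw [pvPreScan_pre pre _ hpre]; simp [pvPreScan, hd1]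

-- pre-scan inside the frontmatter checks each line for 'argument-hint:'
theorem pvPreScan_fm (fm ls' : List String) (hfm : ∀ l ∈ fm, pvIsDash l = false) :
    pvPreScan 1 (fm ++ ls') = (fm.any pvArgP || pvPreScan 1 ls') := by
  induction fm with
  | nil => rfl
  | cons l t ih =>
    by_cases h : pvArgP l = true
    · simp [pvPreScan, hfm l (by simp), h]
    · simp at h
      simp [pvPreScan, hfm l (by simp), h]
      exact ih (fun x hx => hfm x (by simp [hx]))

-- pre-scan stops at the second '---' (returns false beyond it)
theorem pvPreScan_tail (rest2 : List String)
    (htail : rest2 = [] ∨ ∃ d2 tail, rest2 = d2 :: tail ∧ pvIsDash d2 = true) :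
    pvPreScan 1 rest2 = false := by
  rcases htail with h | ⟨d2, tail, rfl, hd2⟩
  · simp [h, pvPreScan]
  · simp [pvPreScan, hd2]

-- from findIdx? = some i: every earlier element fails the predicate
theorem all_take_of_findIdx? {α : Type} {p : α → Bool} {xs : List α} {i : Nat}
    (h : List.findIdx? p xs = some i) : ∀ l ∈ xs.take i, p l = false := by
  obtain ⟨hi, _, hmin⟩ := List.findIdx?_eq_some_iff_getElem.mp h
  intro l hl
  obtain ⟨k, hk, hget⟩ := List.getElem_of_mem hl
  have hki : k < i := by
    have := hk; simp [List.length_take] at this; omega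
  have : xs.take i = xs.take i := rfl
  rw [List.getElem_take] at hget
  subst hget
  simpa using hmin k hki

-- decomposition at an index
theorem decomp_at {α : Type} (xs : List α) (i : Nat) (hi : i < xs.length) :
    xs = xs.take i ++ xs[i] :: xs.drop (i + 1) := by
  rw [List.getElem_cons_drop, List.take_append_drop]

-- ===== main equivalence on an arbitrary line list =====
-- the heart: once the list is decomposed as pre ++ d1 :: (fm ++ rest2), A's two passes
-- produce exactly B's guarded splice
theorem main_region (content hint : String) (ls : List String) (first : Nat)
    (pre fm rest2 : List String) (d1 : String)
    (hdecomp : ls = pre ++ d1 :: (fm ++ rest2))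
    (hprelen : pre.length = first)
    (hpre : ∀ l ∈ pre, pvIsDash l = false) (hd1 : pvIsDash d1 = true)
    (hfm : ∀ l ∈ fm, pvIsDash l = false)
    (htail : rest2 = [] ∨ ∃ d2 tail, rest2 = d2 :: tail ∧ pvIsDash d2 = true) :
    (if pvPreScan 0 ls then content else PySem.Str.join "" (pvLoop hint false 0 false ls)) =
    (if fm.any pvArgP then content
     else match List.findIdx? pvDescP fm with
       | none => PySem.Str.join "" ls
       | some j =>
         PySem.Str.join "" (ls.take (first + 1 + j + 1) ++
           pvInjLine hint (PySem.List.pyGetD fm (j : Int) "") :: ls.drop (first + 1 + j + 1))) := by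
  have hcond : pvPreScan 0 ls = fm.any pvArgP := by
    conv_lhs => rw [hdecomp]
    rw [pvPreScan_enter _ _ _ hpre hd1, pvPreScan_fm fm rest2 hfm, pvPreScan_tail rest2 htail]
    simp
  rw [hcond]
  by_cases hany : fm.any pvArgP = true
  · simp [hany]
  · simp only [Bool.not_eq_true] at hany
    simp only [hany, Bool.false_eq_true, if_false]
    cases hdj : List.findIdx? pvDescP fm with
    | none =>
      have hnod : ∀ l ∈ fm, pvDescP l = false := List.findIdx?_eq_none_iff.mp hdj
      have hloop : pvLoop hint false 0 false ls = ls := by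
        conv_lhs => rw [hdecomp]
        rw [pvLoop_enter _ _ _ _ hpre hd1,
          pvLoop_fm_nodesc hint fm rest2 (fun l hl => ⟨hfm l hl, hnod l hl⟩),
          pvLoop_tail hint rest2 htail, ← hdecomp]
      rw [hloop]
    | some j =>
      obtain ⟨hj, hpj, _⟩ := List.findIdx?_eq_some_iff_getElem.mp hdj
      have ht : ∀ l ∈ fm.take j, pvIsDash l = false ∧ pvDescP l = false :=
        fun l hl => ⟨hfm l (List.mem_of_mem_take hl), all_take_of_findIdx? hdj l hl⟩
      have hdl : pvIsDash fm[j] = false := hfm fm[j] (List.getElem_mem hj)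
      have hsplit : fm ++ rest2 = fm.take j ++ fm[j] :: (fm.drop (j + 1) ++ rest2) :=
        calc fm ++ rest2
            = (fm.take j ++ fm[j] :: fm.drop (j + 1)) ++ rest2 := by
              rw [← decomp_at fm j hj]
          _ = fm.take j ++ fm[j] :: (fm.drop (j + 1) ++ rest2) := by
              simp only [List.append_assoc, List.cons_append]
      -- A's loop result
      have hA : pvLoop hint false 0 false ls =
          (pre ++ d1 :: fm.take j ++ [fm[j]]) ++
            pvInjLine hint fm[j] :: (fm.drop (j + 1) ++ rest2) := by
        conv_lhs => rw [hdecomp]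
        rw [pvLoop_enter _ _ _ _ hpre hd1, hsplit,
          pvLoop_fm_desc hint _ _ _ ht hdl hpj]
        simp only [List.append_assoc, List.cons_append, List.nil_append]
      -- B's fm[j] access
      have hget : PySem.List.pyGetD fm (j : Int) "" = fm[j] := by
        rw [PySem.List.pyGetD_natCast]
        simp [List.getD_eq_getElem?_getD, hj]
      -- B's slices
      have hlist : ls = (pre ++ d1 :: fm.take j ++ [fm[j]]) ++
          (fm.drop (j + 1) ++ rest2) := by
        rw [hdecomp, hsplit]
        simp only [List.append_assoc, List.cons_append, List.nil_append]
      have hlen : (pre ++ d1 :: fm.take j ++ [fm[j]]).length = first + 1 + j + 1 := by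
        simp [hprelen]; omega
      have htake : ls.take (first + 1 + j + 1) = pre ++ d1 :: fm.take j ++ [fm[j]] := by
        conv_lhs => rw [hlist, ← hlen]
        rw [List.take_left]
      have hdrop : ls.drop (first + 1 + j + 1) = fm.drop (j + 1) ++ rest2 := by
        conv_lhs => rw [hlist, ← hlen]
        rw [List.drop_left]
      show _ = PySem.Str.join "" (ls.take (first + 1 + j + 1) ++
        pvInjLine hint (PySem.List.pyGetD fm (j : Int) "") :: ls.drop (first + 1 + j + 1))
      rw [hA, hget, htake, hdrop]

theorem main_lines (content hint : String) (ls : List String) :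
    (if pvPreScan 0 ls then content else PySem.Str.join "" (pvLoop hint false 0 false ls)) =
    (match List.findIdx? pvIsDash ls with
     | none => PySem.Str.join "" ls
     | some first =>
       let rest := ls.drop (first + 1)
       let fmLen := match List.findIdx? pvIsDash rest with
         | some k => k
         | none => rest.length
       let fm := rest.take fmLen
       if fm.any pvArgP then content
       else
         match List.findIdx? pvDescP fm with
         | none => PySem.Str.join "" ls
         | some j =>
           let pos := first + 1 + j + 1
           PySem.Str.join ""
             (ls.take pos ++ pvInjLine hint (PySem.List.pyGetD fm (j : Int) "") :: ls.drop pos)) := by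
  cases hf : List.findIdx? pvIsDash ls with
  | none =>
    have hall : ∀ l ∈ ls, pvIsDash l = false := List.findIdx?_eq_none_iff.mp hf
    have h1 : pvPreScan 0 ls = false := by
      have := pvPreScan_pre ls [] hall; simpa [pvPreScan] using this
    have h2 : pvLoop hint false 0 false ls = ls := by
      have := pvLoop_pre hint ls [] hall; simpa [pvLoop] using this
    simp [h1, h2]
  | some first =>
    obtain ⟨hlt, hpfirst, _⟩ := List.findIdx?_eq_some_iff_getElem.mp hf
    have hpre : ∀ l ∈ ls.take first, pvIsDash l = false := all_take_of_findIdx? hf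
    have hprelen : (ls.take first).length = first := by simp [List.length_take]; omega
    simp only
    generalize hrest : List.drop (first + 1) ls = rest
    cases hg : List.findIdx? pvIsDash rest with
    | none =>
      have hfm : ∀ l ∈ rest, pvIsDash l = false := List.findIdx?_eq_none_iff.mp hg
      simp only [List.take_length]
      exact main_region content hint ls first (ls.take first) rest [] ls[first]
        (by rw [List.append_nil, ← hrest]; exact decomp_at ls first hlt)
        hprelen hpre hpfirst hfm (Or.inl rfl)
    | some k =>
      obtain ⟨hk, hpk, _⟩ := List.findIdx?_eq_some_iff_getElem.mp hg
      have hfm : ∀ l ∈ rest.take k, pvIsDash l = false := all_take_of_findIdx? hg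
      exact main_region content hint ls first (ls.take first) (rest.take k)
        (rest[k] :: rest.drop (k + 1)) ls[first]
        (by rw [← decomp_at rest k hk, ← hrest]; exact decomp_at ls first hlt)
        hprelen hpre hpfirst hfm (Or.inr ⟨rest[k], rest.drop (k + 1), rfl, hpk⟩)

-- ===== VERDICT (by name: the statement is the Claim_ definition above) =====
theorem inject_argument_hint_spec : Claim_equal_inject_argument_hint := by
  intro content hint _
  unfold Spec_inject_argument_hint inject_argument_hint inject_argument_hint_alt
  exact main_lines content hint (pvSplitKeepends content)
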